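-- pv_equiv track=rewrite | github.com/eb-margolis-neuroscience-lab/meap | meappy/meappy/waveform_extract_order_spiketimes.py | get_phy_spikes_list
-- ===== SOURCE A (Python) =====
-- def get_phy_spikes_list(phy_spike_data, phy_spk_clust_data):
--     """
--     iterates through list of channel numbers (int)
--     must use spike clusters, as the templates are not updated with
--     slices and merging of clusters.
--     Returns as dict.
--     """
--     unit_spike_times = dict()
--     for time, unit in zip(phy_spike_data, phy_spk_clust_data):
--         if unit in unit_spike_times:
--             unit_spike_times[unit].append(time)
--         else:
--             unit_spike_times[unit] = list([time])
--     return unit_spike_times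
-- ===== SOURCE B (Python) =====
-- def get_phy_spikes_list(phy_spike_data, phy_spk_clust_data):
--     pairs = list(zip(phy_spike_data, phy_spk_clust_data))
--     units = list(dict.fromkeys(u for _, u in pairs))
--     return {u: [t for t, u2 in pairs if u2 == u] for u in units}
-- ===== Notes on version B (the rewrite author's own statement) =====
-- stated objective: alternative
-- what changed: Replaces the incremental per-element dict insertion/append with a two-phase plan: first compute the distinct units in first-appearance order (dict.fromkeys), then build each unit's time list by one comprehension scan per unit.
import Mathlib
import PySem

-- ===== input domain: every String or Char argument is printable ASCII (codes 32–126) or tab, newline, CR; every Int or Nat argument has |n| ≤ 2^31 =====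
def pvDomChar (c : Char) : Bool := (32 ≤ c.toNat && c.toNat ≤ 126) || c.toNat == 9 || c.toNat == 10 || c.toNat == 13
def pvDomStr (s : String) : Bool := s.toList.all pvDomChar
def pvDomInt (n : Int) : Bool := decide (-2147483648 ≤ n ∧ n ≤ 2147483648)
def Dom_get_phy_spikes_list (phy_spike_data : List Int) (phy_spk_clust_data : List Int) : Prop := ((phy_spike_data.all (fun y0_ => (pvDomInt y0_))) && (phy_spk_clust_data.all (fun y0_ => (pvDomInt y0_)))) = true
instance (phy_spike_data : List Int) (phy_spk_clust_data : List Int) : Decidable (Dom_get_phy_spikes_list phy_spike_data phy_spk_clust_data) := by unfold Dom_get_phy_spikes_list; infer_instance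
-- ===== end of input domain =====

-- B groups per distinct unit (in first-appearance order) by one scan per unit instead of A's
-- incremental dict insertion/append; objective: alternative structure, not faster.

-- ===== PORT A =====
def get_phy_spikes_list (phy_spike_data : List Int) (phy_spk_clust_data : List Int) : List (Int × List Int) :=
  ((phy_spike_data.zip phy_spk_clust_data).foldl
    (fun (d : PySem.Dict Int (List Int)) (p : Int × Int) =>
      if d.contains p.2 then d.modify p.2 [] (fun ts => ts ++ [p.1])
      else d.insert p.2 [p.1])
    PySem.Dict.empty).items

-- ===== PORT B =====
def get_phy_spikes_list_alt (phy_spike_data : List Int) (phy_spk_clust_data : List Int) : List (Int × List Int) :=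
  let pairs := phy_spike_data.zip phy_spk_clust_data
  (PySem.List.dedup (pairs.map (fun p => p.2))).map
    (fun u => (u, (pairs.filter (fun p => p.2 == u)).map (fun p => p.1)))

-- ===== PRECONDITION & SPEC =====
def Spec_get_phy_spikes_list (phy_spike_data : List Int) (phy_spk_clust_data : List Int) (out : List (Int × List Int)) : Prop := out = get_phy_spikes_list_alt phy_spike_data phy_spk_clust_data
instance (phy_spike_data : List Int) (phy_spk_clust_data : List Int) (out : List (Int × List Int)) : Decidable (Spec_get_phy_spikes_list phy_spike_data phy_spk_clust_data out) := by unfold Spec_get_phy_spikes_list; infer_instance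

-- ===== CLAIM (what is proved, stated in full; the proofs are below) =====
def Claim_equal_get_phy_spikes_list : Prop := ∀ (phy_spike_data : List Int) (phy_spk_clust_data : List Int), Dom_get_phy_spikes_list phy_spike_data phy_spk_clust_data → Spec_get_phy_spikes_list phy_spike_data phy_spk_clust_data (get_phy_spikes_list phy_spike_data phy_spk_clust_data)

-- ===== LEMMAS AND PROOFS =====

-- A's branching step is exactly Dict.modify with default []
theorem step_eq_modify (d : PySem.Dict Int (List Int)) (p : Int × Int) :
    (if d.contains p.2 then d.modify p.2 [] (fun ts => ts ++ [p.1])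
     else d.insert p.2 [p.1])
    = d.modify p.2 [] (fun ts => ts ++ [p.1]) := by
  by_cases h : d.contains p.2
  · simp [h]
  · have hg : d.getD p.2 [] = [] :=
      PySem.Dict.getD_of_not_contains d [] (by simpa using h)
    simp [h, PySem.Dict.modify, hg]

-- the fold over (time, unit) pairs keyed by .2 is the swapped fold keyed by .1
theorem fold_swap (l : List (Int × Int)) (d : PySem.Dict Int (List Int)) :
    l.foldl (fun d p => d.modify p.2 [] (fun ts => ts ++ [p.1])) d
    = (l.map Prod.swap).foldl (fun d q => d.modify q.1 [] (fun ts => ts ++ [q.2])) d := by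
  rw [List.foldl_map]; rfl

-- ===== VERDICT (by name: the statement is the Claim_ definition above) =====
theorem get_phy_spikes_list_spec : Claim_equal_get_phy_spikes_list := by
  intro a b _
  unfold Spec_get_phy_spikes_list get_phy_spikes_list get_phy_spikes_list_alt
  have hstep : (fun (d : PySem.Dict Int (List Int)) (p : Int × Int) =>
      if d.contains p.2 then d.modify p.2 [] (fun ts => ts ++ [p.1])
      else d.insert p.2 [p.1])
      = fun d p => d.modify p.2 [] (fun ts => ts ++ [p.1]) := by
    funext d p; exact step_eq_modify d p
  rw [hstep]
  have hnodup : ((a.zip b).foldl (fun (d : PySem.Dict Int (List Int)) p =>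
      d.modify p.2 [] (fun ts => ts ++ [p.1])) PySem.Dict.empty).keys.Nodup :=
    PySem.Dict.nodup_keys_foldl_modify_key (a.zip b) (fun p => p.2) []
      (fun _ p ts => ts ++ [p.1]) _ PySem.Dict.nodup_keys_empty
  rw [PySem.Dict.items_eq_map_keys _ hnodup []]
  have hkeys : ((a.zip b).foldl (fun (d : PySem.Dict Int (List Int)) p =>
      d.modify p.2 [] (fun ts => ts ++ [p.1])) PySem.Dict.empty).keys
      = PySem.List.dedup ((a.zip b).map (fun p => p.2)) := by
    rw [PySem.Dict.keys_foldl_modify_key]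
    simp [PySem.Dict.keys_empty, PySem.Set.update_nil_left, PySem.List.dedup_eq_ofList]
  rw [hkeys]
  refine List.map_congr_left (fun u _ => ?_)
  rw [fold_swap, PySem.Dict.getD_foldl_modify_append]
  simp only [PySem.Dict.getD_empty, List.nil_append, List.filter_map, List.map_map]
  rfl
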